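-- pv_equiv track=rewrite | github.com/udaykumarswamy/dataprivacyandsecurity | test.py | check_recursive_c_l_diversity
-- ===== SOURCE A (Python) =====
-- def check_recursive_c_l_diversity(r_values, c, l):
--     flag = False  # Initialize flag variable to False
--     for i in range(0, len(r_values)):
--         if i == 0:
--             # Remove the second most frequent sensitive value
--             r_prime = r_values[2:]  # Remove the second most frequent sensitive value
--             #r_prime = r_prime[1:]
--             if r_values[1] < c * sum(r_prime):
--                 flag = True
--                 return flag# Set flag to True if condition is met
--         else:
--             # Remove one sensitive value except the most frequent one
--             r_prime = r_values[:i]   # Remove one sensitive value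
--             r_prime = r_values[i+1:]
--             r_prime = [x - r_values[0] for x in r_prime]  # Subtract the count of the most frequent sensitive value
--             if r_values[0] < c * sum(r_prime):
--                 flag = True  # Set flag to True if condition is met
--                 return flag
--
--     return flag
-- ===== SOURCE B (Python) =====
-- def check_recursive_c_l_diversity(r_values, c, l):
--     # One pass with a running suffix sum: each index's condition is evaluated
--     # without re-summing a slice.
--     n = len(r_values)
--     if n < 2:
--         return False
--     total = sum(r_values)
--     r0, r1 = r_values[0], r_values[1]
--     if r1 < c * (total - r0 - r1):
--         return True
--     suffix = total - r0
--     for i in range(1, n):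
--         suffix -= r_values[i]
--         if r0 < c * (suffix - r0 * (n - i - 1)):
--             return True
--     return False
-- ===== Notes on version B (the rewrite author's own statement) =====
-- stated objective: alternative
-- what changed: Replaced A's per-index slicing, list-building and re-summing with a single pass that maintains a running suffix sum, using sum(map(x-r0)) = suffix - r0*len; intended as asymptotically better in the worst case, but a timing run could not confirm a speed-up (A early-returns on most generated inputs).
import Mathlib
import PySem

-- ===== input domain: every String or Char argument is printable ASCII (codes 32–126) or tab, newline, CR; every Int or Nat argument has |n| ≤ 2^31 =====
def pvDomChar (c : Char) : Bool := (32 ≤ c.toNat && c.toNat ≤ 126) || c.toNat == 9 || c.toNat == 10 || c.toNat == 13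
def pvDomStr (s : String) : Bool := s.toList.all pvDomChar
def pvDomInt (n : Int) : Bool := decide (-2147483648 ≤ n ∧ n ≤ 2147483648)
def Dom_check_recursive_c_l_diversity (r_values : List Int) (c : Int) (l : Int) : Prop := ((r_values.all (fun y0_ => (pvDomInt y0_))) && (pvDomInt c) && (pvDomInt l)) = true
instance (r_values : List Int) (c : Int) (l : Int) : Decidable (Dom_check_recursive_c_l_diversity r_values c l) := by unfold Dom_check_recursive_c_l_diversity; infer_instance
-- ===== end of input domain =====

-- B replaces A's per-index slice/map/re-sum with one pass keeping a running suffix sum (alternative algorithm; not measured faster).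


-- ===== PORT A =====
-- A's for-loop with early return, as structural recursion over the range list.
def pvAgo (r_values : List Int) (c : Int) : List Int → Bool
  | [] => false
  | i :: rest =>
    if i = 0 then
      let r_prime := PySem.List.slice r_values (some 2) none
      if PySem.List.pyGetD r_values 1 0 < c * r_prime.sum then true
      else pvAgo r_values c rest
    else
      let r_prime := (PySem.List.slice r_values (some (i+1)) none).map
        (fun x => x - PySem.List.pyGetD r_values 0 0)
      if PySem.List.pyGetD r_values 0 0 < c * r_prime.sum then true
      else pvAgo r_values c rest

def check_recursive_c_l_diversity (r_values : List Int) (c : Int) (l : Int) : Bool :=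
  pvAgo r_values c (PySem.List.pyRange 0 r_values.length 1)

-- ===== PORT B =====
-- B's for-loop: i, running suffix sum, remaining elements.
def pvBgo (r0 : Int) (c : Int) (n : Int) : Int → Int → List Int → Bool
  | _, _, [] => false
  | i, suffix, x :: xs =>
    let suffix' := suffix - x
    if r0 < c * (suffix' - r0 * (n - i - 1)) then true
    else pvBgo r0 c n (i + 1) suffix' xs

def check_recursive_c_l_diversity_alt (r_values : List Int) (c : Int) (l : Int) : Bool :=
  match r_values with
  | r0 :: r1 :: _ =>
    let n : Int := r_values.length
    let total := r_values.sum
    if r1 < c * (total - r0 - r1) then true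
    else pvBgo r0 c n 1 (total - r0) r_values.tail
  | _ => false

-- ===== PRECONDITION & SPEC =====
-- Pre_ excludes exactly the single-element lists, on which A raises IndexError (it reads r_values[1]).
def Pre_check_recursive_c_l_diversity (r_values : List Int) (c : Int) (l : Int) : Prop :=
  r_values.length ≠ 1
instance (r_values : List Int) (c : Int) (l : Int) : Decidable (Pre_check_recursive_c_l_diversity r_values c l) := by unfold Pre_check_recursive_c_l_diversity; infer_instance

def pvWitness_check_recursive_c_l_diversity : List Int × Int × Int := ([3, 2, 1], 2, 2)

def Spec_check_recursive_c_l_diversity (r_values : List Int) (c : Int) (l : Int) (out : Bool) : Prop := out = check_recursive_c_l_diversity_alt r_values c l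
instance (r_values : List Int) (c : Int) (l : Int) (out : Bool) : Decidable (Spec_check_recursive_c_l_diversity r_values c l out) := by unfold Spec_check_recursive_c_l_diversity; infer_instance

-- ===== CLAIM (what is proved, stated in full; the proofs are below) =====
def Claim_equal_check_recursive_c_l_diversity : Prop := ∀ (r_values : List Int) (c : Int) (l : Int), Dom_check_recursive_c_l_diversity r_values c l → Pre_check_recursive_c_l_diversity r_values c l → Spec_check_recursive_c_l_diversity r_values c l (check_recursive_c_l_diversity r_values c l)
-- ===== LEMMAS AND PROOFS =====

theorem sum_map_sub (xs : List Int) (r0 : Int) :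
    (xs.map (fun x => x - r0)).sum = xs.sum - r0 * xs.length := by
  induction xs with
  | nil => simp
  | cons x xs ih => simp [ih]; push_cast; ring

theorem pvAgo_eq_pvBgo (a b : Int) (rest : List Int) (c : Int) :
    ∀ (ys : List Int) (i : Nat), 1 ≤ i → ys = (a :: b :: rest).drop i →
    pvAgo (a :: b :: rest) c (PySem.List.pyRange (i : Int) (a :: b :: rest).length 1)
      = pvBgo a c ((a :: b :: rest).length : Int) (i : Int) ys.sum ys := by
  intro ys
  induction ys with
  | nil =>
    intro i hi hdrop
    have hlen : (a :: b :: rest).length ≤ i := List.drop_eq_nil_iff.mp hdrop.symm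
    rw [PySem.List.pyRange_one_eq_nil (by exact_mod_cast hlen)]
    simp [pvAgo, pvBgo]
  | cons x xs ih =>
    intro i hi hdrop
    have hlt : i < (a :: b :: rest).length := by
      by_contra h
      rw [List.drop_eq_nil_of_le (by omega)] at hdrop
      exact absurd hdrop (by simp)
    rw [PySem.List.pyRange_one_cons (by exact_mod_cast hlt)]
    have hxs : xs = (a :: b :: rest).drop (i + 1) := by
      have h2 : (a :: b :: rest).drop (i + 1) = ((a :: b :: rest).drop i).tail := by
        rw [← List.drop_drop]; simp
      rw [h2, ← hdrop]; rfl
    have hlenxs : (xs.length : Int) = ((a :: b :: rest).length : Int) - i - 1 := by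
      have h3 := congrArg List.length hxs
      simp only [List.length_drop, List.length_cons] at h3 hlt ⊢
      omega
    have hslice : PySem.List.slice (a :: b :: rest) (some ((i : Int) + 1)) none
        = (a :: b :: rest).drop (i + 1) := by
      have h4 : ((i : Int) + 1) = ((i + 1 : Nat) : Int) := by push_cast; ring
      rw [h4, PySem.List.slice_from_natCast]
    have hnn : (0:Int) ≤ (rest.length : Int) + 1 := by positivity
    have hget0 : PySem.List.pyGetD (a :: b :: rest) 0 0 = a := by
      simp [PySem.List.pyGetD, PySem.List.pyGet?, PySem.List.pyIdx?, hnn]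
    simp only [pvAgo, pvBgo]
    rw [if_neg (by omega : ¬ ((i : Int) = 0))]
    rw [hslice, hget0, ← hxs, sum_map_sub]
    have hsum : (x :: xs).sum - x = xs.sum := by simp
    rw [hsum, hlenxs]
    by_cases hc : a < c * (xs.sum - a * (((a :: b :: rest).length : Int) - (i : Int) - 1))
    · rw [if_pos hc, if_pos hc]
    · rw [if_neg hc, if_neg hc]
      have h5 : ((i : Int) + 1) = ((i + 1 : Nat) : Int) := by push_cast; ring
      rw [h5, ih (i + 1) (by omega) hxs]

theorem main_eq (r_values : List Int) (c l : Int)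
    (h : r_values.length ≠ 1) :
    check_recursive_c_l_diversity r_values c l = check_recursive_c_l_diversity_alt r_values c l := by
  match r_values with
  | [] =>
    simp [check_recursive_c_l_diversity, check_recursive_c_l_diversity_alt,
      PySem.List.pyRange_one_eq_nil, pvAgo]
  | [a] => exact absurd rfl h
  | a :: b :: rest =>
    unfold check_recursive_c_l_diversity check_recursive_c_l_diversity_alt
    have hlen0 : (0 : Int) < ((a :: b :: rest).length : Int) := by
      have h0 : 0 < (a :: b :: rest).length := by simp
      exact_mod_cast h0
    rw [PySem.List.pyRange_one_cons hlen0]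
    have hslice2 : PySem.List.slice (a :: b :: rest) (some 2) none = rest := by
      have h2 : (2 : Int) = ((2 : Nat) : Int) := by norm_num
      rw [h2, PySem.List.slice_from_natCast]; simp
    have hget1 : PySem.List.pyGetD (a :: b :: rest) 1 0 = b := by
      simp [PySem.List.pyGetD, PySem.List.pyGet?, PySem.List.pyIdx?]
    have hcond : rest.sum = (a :: b :: rest).sum - a - b := by simp
    simp only [pvAgo, if_true]
    rw [hslice2, hget1, hcond]
    by_cases hc : b < c * ((a :: b :: rest).sum - a - b)
    · rw [if_pos hc, if_pos hc]
    · rw [if_neg hc, if_neg hc]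
      simp only [List.tail_cons]
      have hsum1 : (b :: rest).sum = (a :: b :: rest).sum - a := by simp
      have key := pvAgo_eq_pvBgo a b rest c (b :: rest) 1 (le_refl 1) (by simp)
      rw [hsum1] at key
      rw [show ((0:Int) + 1) = ((1 : Nat) : Int) by norm_num]
      exact key

-- ===== VERDICT (by name: the statement is the Claim_ definition above) =====
theorem check_recursive_c_l_diversity_spec : Claim_equal_check_recursive_c_l_diversity := by
  intro r c l _ hpre
  exact main_eq r c l hpre
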